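-- pv_equiv track=rewrite | github.com/the-lil-cherry/diagnostico-tdd | ex2/resolucao.py | trocar_vogais
-- ===== SOURCE A (Python) =====
-- def trocar_vogais(arg):
--     troca = {
--         "a": "@",
--         "e": "&",
--         "i":"!",
--         "o":"#",
--         "u":"*"
--     }
--     txt = arg
--     for x in troca:
--         txt = txt.replace(x, troca[x])
--     return txt
-- ===== SOURCE B (Python) =====
-- def trocar_vogais(arg):
--     troca = {
--         "a": "@",
--         "e": "&",
--         "i": "!",
--         "o": "#",
--         "u": "*"
--     }
--     return "".join(troca.get(c, c) for c in arg)
-- ===== Notes on version B (the rewrite author's own statement) =====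
-- stated objective: simpler
-- what changed: B builds the result in one pass over the characters, emitting the dict substitute (or the character itself) for each and joining, instead of A's five whole-string replace scans.
import Mathlib
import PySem

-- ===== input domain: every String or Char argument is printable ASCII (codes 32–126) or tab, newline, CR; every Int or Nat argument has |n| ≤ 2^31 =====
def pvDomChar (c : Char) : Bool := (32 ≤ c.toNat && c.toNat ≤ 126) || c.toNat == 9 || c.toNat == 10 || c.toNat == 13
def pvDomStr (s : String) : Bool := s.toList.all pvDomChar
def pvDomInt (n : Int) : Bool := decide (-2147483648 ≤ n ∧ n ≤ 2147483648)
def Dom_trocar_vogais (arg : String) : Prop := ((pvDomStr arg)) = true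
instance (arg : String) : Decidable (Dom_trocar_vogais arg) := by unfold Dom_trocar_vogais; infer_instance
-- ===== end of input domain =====

-- B replaces A's five whole-string .replace scans by a single per-character pass with a dict lookup (objective: simpler).

-- ===== PORT A =====
-- the dict literal 'troca' (insertion order; keys distinct, so the literal list is the dict)
def trocaDict : PySem.Dict String String :=
  ⟨[("a", "@"), ("e", "&"), ("i", "!"), ("o", "#"), ("u", "*")]⟩

-- 'for x in troca: txt = txt.replace(x, troca[x])'  (iterating keys with their values)
def trocar_vogais (arg : String) : String :=
  trocaDict.items.foldl (fun txt kv => PySem.Str.replace txt kv.1 kv.2) arg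

-- ===== PORT B =====
-- '"".join(troca.get(c, c) for c in arg)'
def trocar_vogais_alt (arg : String) : String :=
  PySem.Str.join "" (arg.toList.map (fun c =>
    PySem.Dict.getD trocaDict (String.ofList [c]) (String.ofList [c])))

-- ===== PRECONDITION & SPEC =====
def Spec_trocar_vogais (arg : String) (out : String) : Prop := out = trocar_vogais_alt arg
instance (arg : String) (out : String) : Decidable (Spec_trocar_vogais arg out) := by unfold Spec_trocar_vogais; infer_instance

-- ===== CLAIM (what is proved, stated in full; the proofs are below) =====
def Claim_equal_trocar_vogais : Prop := ∀ (arg : String), Dom_trocar_vogais arg → Spec_trocar_vogais arg (trocar_vogais arg)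

-- ===== LEMMAS AND PROOFS =====

-- the per-character substitution both programs implement
def pvSubst (c : Char) : Char :=
  if c = 'a' then '@' else if c = 'e' then '&' else if c = 'i' then '!'
  else if c = 'o' then '#' else if c = 'u' then '*' else c

-- single-character replace on lists is a map
theorem replace_go_single (o n : Char) :
    ∀ (l : List Char) (fuel : Nat) (acc : List Char), l.length ≤ fuel →
      PySem.Chars.replace.go [o] [n] fuel l acc =
        acc.reverse ++ l.map (fun c => if c = o then n else c) := by
  intro l
  induction l with
  | nil =>
      intro fuel acc _
      cases fuel <;> simp [PySem.Chars.replace.go]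
  | cons c t ih =>
      intro fuel acc hle
      cases fuel with
      | zero => simp at hle
      | succ f =>
          simp only [PySem.Chars.replace.go]
          by_cases hc : c = o
          · subst hc
            rw [if_pos (by simp [List.isPrefixOf])]
            simp only [List.length_cons, List.length_nil, Nat.zero_add, List.drop_succ_cons,
              List.drop_zero, List.reverse_cons, List.reverse_nil, List.nil_append]
            rw [ih _ _ (Nat.le_of_succ_le_succ hle)]
            simp
          · rw [if_neg (by simp [List.isPrefixOf]; exact fun h => hc h.symm)]
            rw [ih _ _ (Nat.le_of_succ_le_succ hle)]
            simp [hc]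

theorem replace_single (o n : Char) (l : List Char) :
    PySem.Chars.replace l [o] [n] = l.map (fun c => if c = o then n else c) := by
  simp only [PySem.Chars.replace, List.isEmpty_cons]
  rw [replace_go_single o n l l.length [] le_rfl]
  simp

theorem chain_eq_subst (c : Char) :
    (if (if (if (if (if c = 'a' then '@' else c) = 'e' then '&'
      else (if c = 'a' then '@' else c)) = 'i' then '!'
      else (if (if c = 'a' then '@' else c) = 'e' then '&'
      else (if c = 'a' then '@' else c))) = 'o' then '#'
      else (if (if (if c = 'a' then '@' else c) = 'e' then '&'
      else (if c = 'a' then '@' else c)) = 'i' then '!'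
      else (if (if c = 'a' then '@' else c) = 'e' then '&'
      else (if c = 'a' then '@' else c)))) = 'u' then '*'
      else (if (if (if (if c = 'a' then '@' else c) = 'e' then '&'
      else (if c = 'a' then '@' else c)) = 'i' then '!'
      else (if (if c = 'a' then '@' else c) = 'e' then '&'
      else (if c = 'a' then '@' else c))) = 'o' then '#'
      else (if (if (if c = 'a' then '@' else c) = 'e' then '&'
      else (if c = 'a' then '@' else c)) = 'i' then '!'
      else (if (if c = 'a' then '@' else c) = 'e' then '&'
      else (if c = 'a' then '@' else c))))) = pvSubst c := by
  by_cases h1 : c = 'a' <;> by_cases h2 : c = 'e' <;> by_cases h3 : c = 'i' <;>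
    by_cases h4 : c = 'o' <;> by_cases h5 : c = 'u' <;>
    simp_all [pvSubst]

theorem a_toList (arg : String) :
    (trocar_vogais arg).toList = arg.toList.map pvSubst := by
  show (PySem.Str.replace (PySem.Str.replace (PySem.Str.replace (PySem.Str.replace
    (PySem.Str.replace arg "a" "@") "e" "&") "i" "!") "o" "#") "u" "*").toList
      = arg.toList.map pvSubst
  simp only [PySem.Str.toList_replace]
  simp only [show ("a":String).toList = ['a'] from rfl, show ("@":String).toList = ['@'] from rfl,
    show ("e":String).toList = ['e'] from rfl, show ("&":String).toList = ['&'] from rfl,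
    show ("i":String).toList = ['i'] from rfl, show ("!":String).toList = ['!'] from rfl,
    show ("o":String).toList = ['o'] from rfl, show ("#":String).toList = ['#'] from rfl,
    show ("u":String).toList = ['u'] from rfl, show ("*":String).toList = ['*'] from rfl]
  simp only [replace_single, List.map_map]
  apply List.map_congr_left
  intro c _
  exact chain_eq_subst c

-- a one-character string equals a string literal "v" iff the characters match
theorem beq_lit_single (v c : Char) (h : ¬ c = v) :
    ((String.ofList [v] : String) == String.ofList [c]) = false := by
  simp only [beq_eq_false_iff_ne, ne_eq]
  intro h2
  have : (String.ofList [v]).toList = [c] := by rw [h2]; simp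
  simp at this
  exact h this.symm

theorem getD_char (c : Char) :
    PySem.Dict.getD trocaDict (String.ofList [c]) (String.ofList [c])
      = String.ofList [pvSubst c] := by
  have e : ∀ v : Char, ¬ c = v →
      ((String.ofList [v] : String) == String.ofList [c]) = false := fun v => beq_lit_single v c
  by_cases h1 : c = 'a'
  · subst h1; rfl
  by_cases h2 : c = 'e'
  · subst h2; rfl
  by_cases h3 : c = 'i'
  · subst h3; rfl
  by_cases h4 : c = 'o'
  · subst h4; rfl
  by_cases h5 : c = 'u'
  · subst h5; rfl
  · simp only [PySem.Dict.getD, trocaDict, PySem.Dict.get?_mk_cons,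
      show ("a":String) = String.ofList ['a'] from rfl, show ("e":String) = String.ofList ['e'] from rfl,
      show ("i":String) = String.ofList ['i'] from rfl, show ("o":String) = String.ofList ['o'] from rfl,
      show ("u":String) = String.ofList ['u'] from rfl,
      e 'a' h1, e 'e' h2, e 'i' h3, e 'o' h4, e 'u' h5, pvSubst,
      if_neg h1, if_neg h2, if_neg h3, if_neg h4, if_neg h5]
    rfl

theorem b_toList (arg : String) :
    (trocar_vogais_alt arg).toList = arg.toList.map pvSubst := by
  simp only [trocar_vogais_alt, getD_char]
  rw [PySem.Str.toList_join]
  simp only [List.map_map]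
  have : (String.toList ∘ fun c => String.ofList [pvSubst c]) = fun c => [pvSubst c] := by
    funext c; simp
  rw [this, show ("" : String).toList = [] from rfl]
  have := PySem.Chars.join_nil_singletons (arg.toList.map pvSubst)
  simpa [List.map_map] using this

-- ===== VERDICT (by name: the statement is the Claim_ definition above) =====
theorem trocar_vogais_spec : Claim_equal_trocar_vogais := by
  intro arg _
  unfold Spec_trocar_vogais
  have h : (trocar_vogais arg).toList = (trocar_vogais_alt arg).toList := by
    rw [a_toList, b_toList]
  exact String.ext (by simpa [String.ext_iff] using h)
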